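-- pv_equiv track=rewrite | github.com/Sudhansan5/InterviewBit-Solution-Python | Arrays/Arrays I/reading_newspaper.py | Solve
-- ===== SOURCE A (Python) =====
-- def Solve(A,B):
--     n=len(B)
--     ans = 0
--     i=0
--     while i <= n:
--         ans += B[i]
--         if ans >= A:
--             return i+1
--         elif i == n-1 and ans < A:
--             i=-1
--         i+=1
-- ===== SOURCE B (Python) =====
-- def Solve(A, B):
--     # prefix sums of one pass over B
--     pre = []
--     s = 0
--     for x in B:
--         s += x
--         pre.append(s)
--     M = max(pre)
--     if M >= A:
--         # reached within the first pass
--         for j, p in enumerate(pre):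
--             if p >= A:
--                 return j + 1
--     # jump k full cycles at once (k = ceil((A - M) / S)), then one scan
--     S = pre[-1]
--     k = (A - M + S - 1) // S
--     base = k * S
--     for j, p in enumerate(pre):
--         if base + p >= A:
--             return j + 1
-- ===== Notes on version B (the rewrite author's own statement) =====
-- stated objective: faster
-- what changed: Instead of simulating the running sum element by element across potentially many cycles, B computes the prefix sums once, jumps over all full cycles in one closed-form ceiling division k = ceil((A - maxPrefix)/sum(B)), and finds the answer with a single scan of the prefix sums.
import Mathlib
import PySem

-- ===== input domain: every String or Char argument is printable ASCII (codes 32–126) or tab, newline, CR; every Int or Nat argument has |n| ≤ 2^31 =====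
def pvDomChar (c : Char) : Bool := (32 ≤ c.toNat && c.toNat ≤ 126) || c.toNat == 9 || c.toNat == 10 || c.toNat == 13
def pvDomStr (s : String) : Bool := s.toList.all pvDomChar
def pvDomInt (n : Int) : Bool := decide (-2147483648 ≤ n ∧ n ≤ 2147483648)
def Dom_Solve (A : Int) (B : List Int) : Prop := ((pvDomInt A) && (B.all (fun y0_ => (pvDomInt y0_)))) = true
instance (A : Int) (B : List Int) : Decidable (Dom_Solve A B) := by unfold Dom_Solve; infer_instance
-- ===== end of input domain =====

-- B replaces A's element-by-element simulation across many cycles by prefix sums plus a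
-- closed-form jump over all full cycles (ceiling division), then one scan: O(n) instead of O(n·A/sum(B)).

-- ===== PORT A =====
-- A's while-loop, transliterated; fuel bounds the (in Python potentially unbounded) iteration
-- count, and is sufficient on every input Pre_Solve admits (proved below).  0 is the
-- fuel-exhausted / IndexError sentinel; A never returns 0 (it returns i+1 with i ≥ 0).
def solveLoop (A : Int) (B : List Int) (n : Int) (ans i : Int) : Nat → Int
  | 0 => 0
  | f + 1 =>
    if i ≤ n then
      match PySem.List.pyGet? B i with
      | none => 0                                   -- B[i] raises IndexError (only for B = [])
      | some b =>
        if ans + b ≥ A then i + 1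
        else if i = n - 1 ∧ ans + b < A then solveLoop A B n (ans + b) 0 f   -- i=-1; i+=1
        else solveLoop A B n (ans + b) (i + 1) f
    else 0                                          -- loop falls through (unreachable: Python returns None)

def solveFuel (A : Int) (B : List Int) : Nat :=
  B.length * (A.natAbs + (B.map Int.natAbs).sum + 2)

def Solve (A : Int) (B : List Int) : Int :=
  solveLoop A B B.length 0 0 (solveFuel A B)

-- ===== PORT B =====
def preSumsAux (s : Int) : List Int → List Int
  | [] => []
  | x :: xs => (s + x) :: preSumsAux (s + x) xs

def firstGe (A base : Int) (j : Int) : List Int → Int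
  | [] => 0                                         -- falls off (unreachable under Pre_Solve)
  | p :: ps => if base + p ≥ A then j + 1 else firstGe A base (j + 1) ps

def Solve_alt (A : Int) (B : List Int) : Int :=
  let pre := preSumsAux 0 B
  match PySem.List.max? pre (fun y => y) with
  | none => 0                                       -- max([]) raises (only for B = [], outside Pre_)
  | some M =>
    if M ≥ A then firstGe A 0 0 pre
    else
      match pre.getLast? with
      | none => 0
      | some S =>
        let k := PySem.Int.floordiv (A - M + S - 1) S
        firstGe A (k * S) 0 pre

-- ===== PRECONDITION & SPEC =====
-- Pre_ excludes exactly the inputs on which Python A never returns a value: B = []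
-- (IndexError on B[0]) and the case where no prefix sum reaches A while sum(B) ≤ 0
-- (A loops forever).  On every input where A returns, Pre_ holds.
def Pre_Solve (A : Int) (B : List Int) : Prop :=
  B ≠ [] ∧ ((∃ j < B.length, A ≤ (B.take (j + 1)).sum) ∨ 0 < B.sum)

instance (A : Int) (B : List Int) : Decidable (Pre_Solve A B) := by
  unfold Pre_Solve; infer_instance

def pvWitness_Solve : Int × List Int := (7, [1, 2])

def Spec_Solve (A : Int) (B : List Int) (out : Int) : Prop := out = Solve_alt A B
instance (A : Int) (B : List Int) (out : Int) : Decidable (Spec_Solve A B out) := by unfold Spec_Solve; infer_instance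

-- ===== CLAIM (what is proved, stated in full; the proofs are below) =====
def Claim_equal_Solve : Prop := ∀ (A : Int) (B : List Int), Dom_Solve A B → Pre_Solve A B → Spec_Solve A B (Solve A B)

-- ===== LEMMAS AND PROOFS =====

-- Abstract description of one pass over the remaining suffix: index (0-based) of the first
-- position whose running sum reaches A, if any.
def scanHit (A : Int) : Int → List Int → Option Nat
  | _, [] => none
  | acc, x :: xs => if A ≤ acc + x then some 0 else (scanHit A (acc + x) xs).map (· + 1)

theorem preSumsAux_length (s : Int) (xs : List Int) : (preSumsAux s xs).length = xs.length := by
  induction xs generalizing s with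
  | nil => rfl
  | cons x xs ih => simp [preSumsAux, ih]

theorem preSumsAux_getLast (s : Int) (xs : List Int) (h : xs ≠ []) :
    (preSumsAux s xs).getLast? = some (s + xs.sum) := by
  induction xs generalizing s with
  | nil => exact absurd rfl h
  | cons x xs ih =>
    cases xs with
    | nil => simp [preSumsAux]
    | cons y ys =>
      have h2 := ih (s := s + x) (by simp)
      simp only [preSumsAux] at h2 ⊢
      rw [List.getLast?_cons_cons, h2]
      simp only [List.sum_cons, Option.some.injEq]
      ring

theorem mem_preSumsAux (xs : List Int) (s p : Int) :
    p ∈ preSumsAux s xs ↔ ∃ j < xs.length, p = s + (xs.take (j + 1)).sum := by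
  induction xs generalizing s with
  | nil => simp [preSumsAux]
  | cons x xs ih =>
    simp only [preSumsAux, List.mem_cons, ih, List.length_cons]
    constructor
    · rintro (rfl | ⟨j, hj, rfl⟩)
      · exact ⟨0, by omega, by simp⟩
      · exact ⟨j + 1, by omega, by simp [List.take_succ_cons]; ring⟩
    · rintro ⟨j, hj, rfl⟩
      cases j with
      | zero => left; simp
      | succ j =>
        right
        exact ⟨j, by omega, by simp [List.take_succ_cons]; ring⟩

theorem scanHit_none_iff (A : Int) (xs : List Int) :
    ∀ acc : Int, scanHit A acc xs = none ↔ ∀ j < xs.length, acc + (xs.take (j + 1)).sum < A := by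
  induction xs with
  | nil => intro acc; simp [scanHit]
  | cons x xs ih =>
    intro acc
    simp only [scanHit, List.length_cons]
    by_cases h : A ≤ acc + x
    · simp only [if_pos h]
      constructor
      · intro hc; exact absurd hc (by simp)
      · intro hall
        have := hall 0 (by omega)
        simp at this; omega
    · simp only [if_neg h, Option.map_eq_none_iff, ih]
      constructor
      · intro hall j hj
        cases j with
        | zero => simpa using (by omega : acc + x < A)
        | succ j =>
          have := hall j (by omega)
          simp only [List.take_succ_cons, List.sum_cons] at *
          omega
      · intro hall j hj
        have := hall (j + 1) (by omega)
        simp only [List.take_succ_cons, List.sum_cons] at this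
        omega

theorem firstGe_eq (A : Int) (xs : List Int) :
    ∀ (s base j : Int),
      firstGe A base j (preSumsAux s xs) =
        match scanHit A (base + s) xs with
        | some l => j + (l : Int) + 1
        | none => 0 := by
  induction xs with
  | nil => intro s base j; simp [preSumsAux, firstGe, scanHit]
  | cons x xs ih =>
    intro s base j
    simp only [preSumsAux, firstGe, scanHit]
    by_cases h : A ≤ base + s + x
    · rw [if_pos (by omega : base + (s + x) ≥ A), if_pos h]
      simp
    · rw [if_neg (by omega : ¬ base + (s + x) ≥ A), if_neg h]
      rw [ih (s + x) base (j + 1), show base + (s + x) = base + s + x by ring]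
      cases hsc : scanHit A (base + s + x) xs with
      | none => simp
      | some l =>
        simp only [Option.map_some]
        push_cast
        ring

theorem solveLoop_cycle (A : Int) (B : List Int) :
    ∀ (xs : List Int) (j : Nat) (ans : Int) (f : Nat),
      B.drop j = xs → xs ≠ [] → xs.length ≤ f →
      solveLoop A B B.length ans (j : Int) f =
        match scanHit A ans xs with
        | some l => (j : Int) + l + 1
        | none => solveLoop A B B.length (ans + xs.sum) 0 (f - xs.length) := by
  intro xs
  induction xs with
  | nil => intro j ans f _ hne; exact absurd rfl hne
  | cons x xs ih =>
    intro j ans f hdrop _ hf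
    have hjlt : j < B.length := by
      by_contra h
      rw [List.drop_eq_nil_of_le (by omega)] at hdrop
      exact absurd hdrop (by simp)
    have hlen : B.length - j = xs.length + 1 := by
      have := congrArg List.length hdrop
      simp at this; omega
    obtain ⟨f', rfl⟩ : ∃ f', f = f' + 1 := ⟨f - 1, by simp at hf; omega⟩
    have hget : PySem.List.pyGet? B (j : Int) = some x := by
      rw [PySem.List.pyGet?_natCast]
      have : (B.drop j)[0]? = some x := by rw [hdrop]; rfl
      rwa [List.getElem?_drop, Nat.add_zero] at this
    simp only [solveLoop, if_pos (by exact_mod_cast Nat.le_of_lt hjlt : (j : Int) ≤ (B.length : Int)), hget]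
    by_cases hhit : ans + x ≥ A
    · rw [if_pos hhit]
      simp [scanHit, hhit]
    · rw [if_neg hhit]
      have hxlt : ans + x < A := by omega
      cases xs with
      | nil =>
        have hj : (j : Int) = (B.length : Int) - 1 := by simp at hlen; omega
        rw [if_pos ⟨hj, hxlt⟩]
        simp [scanHit, hhit]
      | cons y ys =>
        have hj : ¬ ((j : Int) = (B.length : Int) - 1 ∧ ans + x < A) := by
          rintro ⟨hj, -⟩
          simp at hlen; omega
        rw [if_neg hj]
        have hdrop' : B.drop (j + 1) = y :: ys := by
          have := congrArg (List.drop 1) hdrop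
          rw [List.drop_drop] at this
          simpa using this
        have := ih (j + 1) (ans + x) f' hdrop' (by simp) (by simp at hf ⊢; omega)
        rw [show ((j : Int) + 1) = ((j + 1 : Nat) : Int) by push_cast; ring, this]
        rw [show scanHit A ans (x :: y :: ys) =
              if A ≤ ans + x then some 0 else (scanHit A (ans + x) (y :: ys)).map (· + 1) from rfl,
            if_neg (by omega : ¬ A ≤ ans + x)]
        cases hsc : scanHit A (ans + x) (y :: ys) with
        | none =>
          simp only [Option.map_none]
          congr 1
          · simp; ring
          · simp
        | some l =>
          simp only [Option.map_some]
          push_cast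
          ring

theorem solveLoop_cycles (A : Int) (B : List Int) (hne : B ≠ []) :
    ∀ (k : Nat) (off : Int) (f : Nat),
      (∀ c : Nat, c < k → ∀ j < B.length, off + c * B.sum + (B.take (j + 1)).sum < A) →
      k * B.length ≤ f →
      solveLoop A B B.length off 0 f =
        solveLoop A B B.length (off + k * B.sum) 0 (f - k * B.length) := by
  intro k
  induction k with
  | zero => intro off f _ _; simp
  | succ k ih =>
    intro off f hsmall hf
    have hscan : scanHit A off B = none := by
      rw [scanHit_none_iff]
      intro j hj
      have := hsmall 0 (by omega) j hj
      simpa using this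
    have h1 := solveLoop_cycle A B B (j := 0) off f (by simp) hne
      (by have : 1 * B.length ≤ (k + 1) * B.length := by
            apply Nat.mul_le_mul_right; omega
          omega)
    simp only [Nat.cast_zero, hscan] at h1
    rw [h1]
    have h2 := ih (off + B.sum) (f - B.length)
      (by intro c hc j hj
          have := hsmall (c + 1) (by omega) j hj
          push_cast at this ⊢
          linarith)
      (by have : (k + 1) * B.length = k * B.length + B.length := by ring
          omega)
    rw [h2]
    congr 1
    · push_cast; ring
    · have : (k + 1) * B.length = k * B.length + B.length := by ring
      omega

theorem sum_natAbs_bound (xs : List Int) : xs.sum.natAbs ≤ (xs.map Int.natAbs).sum := by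
  induction xs with
  | nil => simp
  | cons x xs ih =>
    simp only [List.sum_cons, List.map_cons]
    calc (x + xs.sum).natAbs ≤ x.natAbs + xs.sum.natAbs := Int.natAbs_add_le _ _
      _ ≤ x.natAbs + (xs.map Int.natAbs).sum := by omega

theorem take_natAbs_bound (xs : List Int) (m : Nat) :
    ((xs.take m).map Int.natAbs).sum ≤ (xs.map Int.natAbs).sum := by
  have hsplit : xs.map Int.natAbs = (xs.take m).map Int.natAbs ++ (xs.drop m).map Int.natAbs := by
    rw [← List.map_append, List.take_append_drop]
  conv_rhs => rw [hsplit]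
  rw [List.sum_append]
  omega

-- ===== VERDICT (by name: the statement is the Claim_ definition above) =====
theorem Solve_spec : Claim_equal_Solve := by
  intro A B _hdom hpre
  obtain ⟨hne, hpre⟩ := hpre
  unfold Spec_Solve Solve Solve_alt
  have hprelen : (preSumsAux 0 B).length = B.length := preSumsAux_length 0 B
  have hprene : preSumsAux 0 B ≠ [] := by
    intro h; apply hne
    have := congrArg List.length h
    rw [preSumsAux_length] at this
    simpa using this
  obtain ⟨M, hM⟩ : ∃ M, PySem.List.max? (preSumsAux 0 B) (fun y => y) = some M := by
    cases h : PySem.List.max? (preSumsAux 0 B) (fun y => y) with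
    | none => exact absurd ((PySem.List.max?_eq_none_iff _ _).mp h) hprene
    | some M => exact ⟨M, rfl⟩
  have hMmem : M ∈ preSumsAux 0 B := PySem.List.max?_mem hM
  have hMmax : ∀ p ∈ preSumsAux 0 B, p ≤ M := fun p hp => PySem.List.max?_isMax hM p hp
  obtain ⟨jM, hjM, hMeq⟩ := (mem_preSumsAux B 0 M).mp hMmem
  -- every prefix sum is ≤ M
  have hprefle : ∀ j < B.length, (B.take (j + 1)).sum ≤ M := by
    intro j hj
    have : 0 + (B.take (j + 1)).sum ≤ M :=
      hMmax _ ((mem_preSumsAux B 0 _).mpr ⟨j, hj, rfl⟩)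
    omega
  have hfuel : B.length ≤ solveFuel A B := by
    unfold solveFuel
    have : 1 ≤ A.natAbs + (B.map Int.natAbs).sum + 2 := by omega
    calc B.length = B.length * 1 := by omega
      _ ≤ _ := Nat.mul_le_mul_left _ this
  simp only [hM]
  by_cases hMA : M ≥ A
  · -- hit within the first cycle
    rw [if_pos hMA]
    have hscan : scanHit A 0 B ≠ none := by
      intro h
      have := (scanHit_none_iff A B 0).mp h jM hjM
      omega
    obtain ⟨l, hl⟩ : ∃ l, scanHit A 0 B = some l := by
      cases h : scanHit A 0 B with
      | none => exact absurd h hscan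
      | some l => exact ⟨l, rfl⟩
    have hA := solveLoop_cycle A B B (j := 0) 0 (solveFuel A B) (by simp) hne hfuel
    simp only [Nat.cast_zero, hl] at hA
    rw [hA, firstGe_eq A B 0 0 0]
    simp [hl]
  · -- jump k full cycles, then one scan
    rw [if_neg hMA]
    have hS : 0 < B.sum := by
      rcases hpre with ⟨j, hj, hge⟩ | hS
      · exact absurd hMA (by have := hprefle j hj; omega)
      · exact hS
    rw [preSumsAux_getLast 0 B hne]
    simp only [zero_add]
    set S := B.sum with hSdef
    set k := PySem.Int.floordiv (A - M + S - 1) S with hkdef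
    have hkbr : k * S ≤ A - M + S - 1 ∧ A - M + S - 1 < (k + 1) * S :=
      (PySem.Int.floordiv_eq_iff_of_pos hS).mp hkdef.symm
    have hAM : M < A := by omega
    have hk1 : A ≤ k * S + M := by nlinarith [hkbr.2]
    have hkmin : (k - 1) * S + M < A := by nlinarith [hkbr.1]
    have hkpos : 1 ≤ k := by nlinarith [hkbr.1, hkbr.2]
    have hkAM : k ≤ A - M := by nlinarith [hkbr.1]
    -- bound k by the fuel budget
    have hMabs : -M ≤ ((B.map Int.natAbs).sum : Int) := by
      have h1 : (B.take (jM + 1)).sum.natAbs ≤ ((B.take (jM + 1)).map Int.natAbs).sum :=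
        sum_natAbs_bound _
      have h2 := take_natAbs_bound B (jM + 1)
      have h3 : -(B.take (jM + 1)).sum ≤ ((B.take (jM + 1)).sum.natAbs : Int) := by
        rcases Int.natAbs_eq ((B.take (jM + 1)).sum) with h | h <;> omega
      omega
    have hkle : k ≤ (A.natAbs : Int) + ((B.map Int.natAbs).sum : Int) + 1 := by
      have h1 : A ≤ (A.natAbs : Int) := Int.le_natAbs
      linarith [hkAM, hMabs]
    have hkbound : k.toNat ≤ A.natAbs + (B.map Int.natAbs).sum + 1 := by omega
    set K := k.toNat with hKdef
    have hKcast : (K : Int) = k := Int.toNat_of_nonneg (by omega)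
    have hcyc := solveLoop_cycles A B hne K 0 (solveFuel A B)
      (by intro c hc j hj
          have hcS : (c : Int) * S ≤ (k - 1) * S := by
            apply mul_le_mul_of_nonneg_right _ (le_of_lt hS)
            omega
          have := hprefle j hj
          linarith [hkmin])
      (by unfold solveFuel
          calc K * B.length ≤ (A.natAbs + (B.map Int.natAbs).sum + 1) * B.length :=
                Nat.mul_le_mul_right _ hkbound
            _ ≤ B.length * (A.natAbs + (B.map Int.natAbs).sum + 2) := by ring_nf; omega)
    rw [hcyc]
    have hfuel2 : B.length ≤ solveFuel A B - K * B.length := by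
      unfold solveFuel
      have h1 : (K + 1) * B.length ≤ B.length * (A.natAbs + (B.map Int.natAbs).sum + 2) := by
        calc (K + 1) * B.length ≤ (A.natAbs + (B.map Int.natAbs).sum + 2) * B.length := by
              apply Nat.mul_le_mul_right; omega
          _ = _ := by ring
      have h2 : (K + 1) * B.length = K * B.length + B.length := by ring
      omega
    have hscan : scanHit A (0 + (K : Int) * S) B ≠ none := by
      rw [hKcast]
      intro h
      have := (scanHit_none_iff A B _).mp h jM hjM
      omega
    obtain ⟨l, hl⟩ : ∃ l, scanHit A (0 + (K : Int) * S) B = some l := by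
      cases h : scanHit A (0 + (K : Int) * S) B with
      | none => exact absurd h hscan
      | some l => exact ⟨l, rfl⟩
    have hA2 := solveLoop_cycle A B B (j := 0) (0 + (K : Int) * S) (solveFuel A B - K * B.length)
      (by simp) hne hfuel2
    simp only [Nat.cast_zero, hl] at hA2
    rw [hA2, firstGe_eq A B 0 (k * S) 0]
    rw [show k * S + 0 = 0 + (K : Int) * S by rw [hKcast]; ring, hl]
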